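-- pv_equiv track=rewrite | github.com/rohitnamdev/IBM_Practice_Questions | pass_baton_friends.py | batonPass
-- ===== SOURCE A (Python) =====
-- def batonPass(friends, time):
--     current_passer = 1  # Start with Friend 1
--     direction = 1  # 1 for forward, -1 for backward
--
--     for _ in range(time):
--         # Pass the baton
--         current_passer += direction
--
--         # Reverse direction when reaching the end or the beginning
--         if current_passer == friends + 1:
--             direction = -1
--             current_passer = friends - 1
--         elif current_passer == 0:
--             direction = 1
--             current_passer = 2
--
--     final_passer = current_passer
--     final_receiver = current_passer + direction
--
--     return [final_passer, final_receiver]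
-- ===== SOURCE B (Python) =====
-- def batonPass(friends, time):
--     # closed-form zigzag: position repeats with period 2*(friends-1)
--     if time <= 0:
--         return [1, 2]
--     cycle = 2 * (friends - 1)
--     r = (time - 1) % cycle + 1
--     if r <= friends - 1:
--         return [1 + r, 2 + r]
--     return [2 * friends - 1 - r, 2 * friends - 2 - r]
-- ===== Notes on version B (the rewrite author's own statement) =====
-- stated objective: faster
-- what changed: Replaces the step-by-step baton simulation loop with an O(1) closed-form zigzag formula using (time-1) % (2*(friends-1)).
-- outside the precondition, e.g. on batonPass(1, 3): A returns [-2, -3], B raises ZeroDivisionError; on batonPass(0, 3): A returns [4, 5], B returns [-2, -3]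
import Mathlib
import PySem

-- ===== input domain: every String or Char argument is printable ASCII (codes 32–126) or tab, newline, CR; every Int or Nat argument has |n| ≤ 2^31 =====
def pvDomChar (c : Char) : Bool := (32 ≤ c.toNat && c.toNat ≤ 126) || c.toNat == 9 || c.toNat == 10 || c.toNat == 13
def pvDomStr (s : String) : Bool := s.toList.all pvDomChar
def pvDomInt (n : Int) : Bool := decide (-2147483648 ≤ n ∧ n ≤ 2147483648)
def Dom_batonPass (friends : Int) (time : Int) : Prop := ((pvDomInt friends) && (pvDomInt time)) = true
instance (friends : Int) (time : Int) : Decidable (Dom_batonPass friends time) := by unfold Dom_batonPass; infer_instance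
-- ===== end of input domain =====

-- B replaces A's O(time) simulation loop by an O(1) closed-form zigzag formula.

-- ===== PORT A =====
def batonPass (friends : Int) (time : Int) : List Int :=
  let st :=
    (PySem.List.pyRange 0 time 1).foldl
      (fun (s : Int × Int) _ =>
        let c := s.1 + s.2
        if c = friends + 1 then (friends - 1, -1)
        else if c = 0 then (2, 1)
        else (c, s.2))
      (1, 1)
  [st.1, st.1 + st.2]

-- ===== PORT B =====
def batonPass_alt (friends : Int) (time : Int) : List Int :=
  if time ≤ 0 then [1, 2]
  else
    let cycle := 2 * (friends - 1)
    let r := PySem.Int.mod (time - 1) cycle + 1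
    if r ≤ friends - 1 then [1 + r, 2 + r]
    else [2 * friends - 1 - r, 2 * friends - 2 - r]

-- ===== PRECONDITION & SPEC =====
-- Pre_ excludes friends ≤ 1 with positive time, degenerate inputs where A's loop never
-- bounces and drifts to nonexistent friend numbers, while B's cycle length 2*(friends-1)
-- is nonpositive so Python's % raises or disagrees.
def Pre_batonPass (friends : Int) (time : Int) : Prop := 2 ≤ friends ∨ time ≤ 0
instance (friends : Int) (time : Int) : Decidable (Pre_batonPass friends time) := by unfold Pre_batonPass; infer_instance
def pvWitness_batonPass : Int × Int := (5, 13)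

def Spec_batonPass (friends : Int) (time : Int) (out : List Int) : Prop := out = batonPass_alt friends time
instance (friends : Int) (time : Int) (out : List Int) : Decidable (Spec_batonPass friends time out) := by unfold Spec_batonPass; infer_instance

-- ===== CLAIM (what is proved, stated in full; the proofs are below) =====
def Claim_equal_batonPass : Prop := ∀ (friends : Int) (time : Int), Dom_batonPass friends time → Pre_batonPass friends time → Spec_batonPass friends time (batonPass friends time)

-- ===== LEMMAS AND PROOFS =====

-- the loop body of A, named for the proofs
def zig (f : Int) (s : Int × Int) : Int × Int :=
  let c := s.1 + s.2
  if c = f + 1 then (f - 1, -1)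
  else if c = 0 then (2, 1)
  else (c, s.2)

theorem zig_pair (f p d : Int) :
    zig f (p, d) = if p + d = f + 1 then (f - 1, -1) else if p + d = 0 then (2, 1) else (p + d, d) := rfl

-- a foldl that ignores the list elements is function iteration
theorem foldl_const_iterate {α β : Type} (g : α → α) :
    ∀ (l : List β) (init : α), l.foldl (fun s _ => g s) init = g^[l.length] init := by
  intro l
  induction l with
  | nil => intro init; simp
  | cons x xs ih =>
      intro init
      simp [List.foldl, ih, Function.iterate_succ_apply]

-- closed form of A's state after n+1 steps, friends ≥ 2
theorem batonState_closed (f : Int) (hf : 2 ≤ f) (n : ℕ) :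
    (zig f)^[n + 1] (1, 1) =
      (if ((n % (2 * (f - 1)).toNat : ℕ) : Int) + 1 ≤ f - 1
       then (((n % (2 * (f - 1)).toNat : ℕ) : Int) + 2, 1)
       else (2 * f - 2 - ((n % (2 * (f - 1)).toNat : ℕ) : Int), -1)) := by
  induction n with
  | zero =>
      rw [Function.iterate_one]
      simp only [Nat.zero_mod, Nat.cast_zero, zero_add]
      rw [zig_pair]
      split_ifs <;> simp only [Prod.mk.injEq, and_true] <;> omega
  | succ n ih =>
      have hMpos : 0 < (2 * (f - 1)).toNat := by omega
      have hlt : n % (2 * (f - 1)).toNat < (2 * (f - 1)).toNat := Nat.mod_lt n hMpos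
      have hsucc : (n + 1) % (2 * (f - 1)).toNat =
          if n % (2 * (f - 1)).toNat + 1 = (2 * (f - 1)).toNat then 0
          else n % (2 * (f - 1)).toNat + 1 := by
        rcases Nat.lt_or_ge 1 ((2 * (f - 1)).toNat) with hM1 | hM1
        · rw [Nat.add_mod, Nat.mod_eq_of_lt hM1]
          split_ifs with h
          · rw [h, Nat.mod_self]
          · exact Nat.mod_eq_of_lt (by omega)
        · omega
      rw [Function.iterate_succ_apply', ih, hsucc]
      generalize hk : n % (2 * (f - 1)).toNat = k at hlt ⊢
      clear hk hsucc ih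
      by_cases hend : k + 1 = (2 * (f - 1)).toNat
      · -- wrap-around step: state (1, -1) becomes (2, 1)
        rw [if_pos hend]
        have hnf : ¬ ((k : ℕ) : Int) + 1 ≤ f - 1 := by omega
        rw [if_neg hnf, zig_pair]
        split_ifs <;> simp only [Prod.mk.injEq, and_true] <;> omega
      · rw [if_neg hend]
        by_cases hfwd : ((k : ℕ) : Int) + 1 ≤ f - 1
        · rw [if_pos hfwd, zig_pair]
          split_ifs <;> simp only [Prod.mk.injEq, and_true] <;> omega
        · rw [if_neg hfwd, zig_pair]
          split_ifs <;> simp only [Prod.mk.injEq, and_true] <;> omega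

-- ===== VERDICT (by name: the statement is the Claim_ definition above) =====
theorem batonPass_spec : Claim_equal_batonPass := by
  intro f t _ hpre
  unfold Spec_batonPass batonPass batonPass_alt
  have hzig : (fun (s : Int × Int) (_ : Int) =>
      let c := s.1 + s.2
      if c = f + 1 then (f - 1, -1)
      else if c = 0 then (2, 1)
      else (c, s.2)) = (fun s _ => zig f s) := rfl
  by_cases ht : t ≤ 0
  · rw [PySem.List.pyRange_one_eq_nil (by omega)]
    rw [if_pos ht]
    simp
  · have hf : 2 ≤ f := by rcases hpre with h | h <;> omega
    rw [if_neg ht]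
    rw [hzig, foldl_const_iterate (zig f), PySem.List.length_pyRange_one]
    have hn : (t - 0).toNat = (t - 1).toNat + 1 := by omega
    rw [hn, batonState_closed f hf]
    have hmod : PySem.Int.mod (t - 1) (2 * (f - 1)) =
        (((t - 1).toNat % (2 * (f - 1)).toNat : ℕ) : Int) := by
      rw [PySem.Int.mod_eq_emod_of_pos (by omega)]
      have h1 : (t - 1) = (((t - 1).toNat : ℕ) : Int) := by omega
      have h2 : (2 * (f - 1)) = (((2 * (f - 1)).toNat : ℕ) : Int) := by omega
      rw [h1, h2]
      push_cast
      rfl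
    simp only [hmod]
    by_cases hc : (((t - 1).toNat % (2 * (f - 1)).toNat : ℕ) : Int) + 1 ≤ f - 1
    · rw [if_pos hc, if_pos hc]
      simp only [List.cons.injEq, and_true]
      constructor <;> omega
    · rw [if_neg hc, if_neg hc]
      simp only [List.cons.injEq, and_true]
      constructor <;> omega
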